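-- pv_equiv track=rewrite | github.com/GamesDoneQuick/donation-tracker | tracker/util.py | natural_list_parse
-- ===== SOURCE A (Python) =====
-- def natural_list_parse(s, symbol_only=False):
--     """Parses a 'natural language' list, e.g.. seperated by commas,
--     semi-colons, 'and', 'or', etc..."""
--     tokens = [s]
--     seperators = [',', ';', '&', '+']
--     if not symbol_only:
--         seperators += [' and ', ' or ', ' and/or ', ' vs. ']
--     for sep in seperators:
--         newtokens = []
--         for token in tokens:
--             while len(token) > 0:
--                 before, found, after = token.partition(sep)
--                 newtokens.append(before)
--                 token = after
--         tokens = newtokens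
--     return [x for x in [x.strip() for x in tokens] if len(x) > 0]
-- ===== SOURCE B (Python) =====
-- def natural_list_parse(s, symbol_only=False):
--     """Parses a 'natural language' list, e.g.. seperated by commas,
--     semi-colons, 'and', 'or', etc..."""
--     separators = [',', ';', '&', '+']
--     if not symbol_only:
--         separators += [' and ', ' or ', ' and/or ', ' vs. ']
--
--     def split_all(text, seps):
--         if not seps:
--             return [text]
--         return [piece for part in text.split(seps[0]) for piece in split_all(part, seps[1:])]
--
--     return [x for x in (t.strip() for t in split_all(s, separators)) if x]
-- ===== Notes on version B (the rewrite author's own statement) =====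
-- stated objective: simpler
-- what changed: A's imperative multi-pass loop (mutable token list rebuilt per separator with an inner while/str.partition loop) is replaced by a short recursion over the separator list that uses str.split once per separator and flattens, then strips and drops empties; the separator priority A's sequential passes impose (e.g. on ' or and ') is preserved, unlike the single regex-alternation split the hint suggests.
import Mathlib
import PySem

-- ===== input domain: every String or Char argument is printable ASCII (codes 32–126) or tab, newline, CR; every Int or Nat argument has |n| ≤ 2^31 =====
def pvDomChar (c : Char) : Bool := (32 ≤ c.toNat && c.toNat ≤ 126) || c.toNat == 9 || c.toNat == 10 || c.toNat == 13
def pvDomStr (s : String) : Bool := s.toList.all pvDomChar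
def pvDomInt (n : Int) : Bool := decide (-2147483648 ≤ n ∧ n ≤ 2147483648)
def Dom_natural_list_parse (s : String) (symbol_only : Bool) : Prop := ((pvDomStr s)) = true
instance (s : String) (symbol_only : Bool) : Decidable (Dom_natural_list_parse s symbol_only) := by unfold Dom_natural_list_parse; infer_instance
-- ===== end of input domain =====

-- ===== PORT A =====
-- B replaces A's mutable multi-pass token loop (inner while + str.partition) by a recursion
-- over the separator list using str.split and flattening; simpler, same result.

-- exact port of Python's str.partition: split at the FIRST occurrence (PySem.Chars.find)
def pyPartition (t sep : List Char) : List Char × List Char × List Char :=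
  let i := PySem.Chars.find t sep
  if i = -1 then (t, [], [])
  else (t.take i.toNat, sep, t.drop (i.toNat + sep.length))

-- A's inner `while len(token) > 0` loop; fuel = initial length + 1, always sufficient for the
-- nonempty separators A uses (each found occurrence consumes at least one character)
def passTok (sep : List Char) : Nat → List Char → List (List Char)
  | 0, _ => []
  | fuel + 1, t =>
    if t.length > 0 then
      (pyPartition t sep).1 :: passTok sep fuel (pyPartition t sep).2.2
    else []

def natural_list_parse (s : String) (symbol_only : Bool) : List String :=
  let seps0 : List (List Char) := [[','], [';'], ['&'], ['+']]
  let seps := if !symbol_only then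
      seps0 ++ [" and ".toList, " or ".toList, " and/or ".toList, " vs. ".toList]
    else seps0
  let tokens := seps.foldl
    (fun tokens sep =>
      tokens.foldl (fun newtokens token => newtokens ++ passTok sep (token.length + 1) token) [])
    [s.toList]
  ((tokens.map PySem.Chars.strip).filter (fun x => decide (0 < x.length))).map String.ofList

-- ===== PORT B =====
-- recursion over the separator list: split by the first separator, recurse on each part
def splitAll : List (List Char) → List Char → List (List Char)
  | [], text => [text]
  | sep :: rest, text => (PySem.Chars.splitOn text sep).flatMap (fun part => splitAll rest part)

def natural_list_parse_alt (s : String) (symbol_only : Bool) : List String :=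
  let seps0 : List (List Char) := [[','], [';'], ['&'], ['+']]
  let seps := if !symbol_only then
      seps0 ++ [" and ".toList, " or ".toList, " and/or ".toList, " vs. ".toList]
    else seps0
  (((splitAll seps s.toList).map PySem.Chars.strip).filter (fun x => x ≠ [])).map String.ofList

-- ===== PRECONDITION & SPEC =====
def Spec_natural_list_parse (s : String) (symbol_only : Bool) (out : List String) : Prop := out = natural_list_parse_alt s symbol_only
instance (s : String) (symbol_only : Bool) (out : List String) : Decidable (Spec_natural_list_parse s symbol_only out) := by unfold Spec_natural_list_parse; infer_instance

-- ===== CLAIM (what is proved, stated in full; the proofs are below) =====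
def Claim_equal_natural_list_parse : Prop := ∀ (s : String) (symbol_only : Bool), Dom_natural_list_parse s symbol_only → Spec_natural_list_parse s symbol_only (natural_list_parse s symbol_only)

-- ===== LEMMAS AND PROOFS =====

def mapHead (f : List Char → List Char) : List (List Char) → List (List Char)
  | [] => []
  | x :: xs => f x :: xs

theorem splitOn_go_spec (sep : List Char) (hsep : sep ≠ []) :
    ∀ (n : Nat) (l : List Char), l.length ≤ n → ∀ (fuel : Nat), l.length < fuel →
      ∀ (cur : List Char) (acc : List (List Char)),
      PySem.Chars.splitOn.go sep fuel l cur acc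
        = acc.reverse ++ mapHead (fun p => cur.reverse ++ p) (PySem.Chars.splitOn l sep) := by
  intro n
  induction n using Nat.strong_induction_on with
  | _ n ih =>
    intro l hl fuel hfuel cur acc
    match l, fuel with
    | [], fuel + 1 =>
      rw [PySem.Chars.splitOn.go.eq_def]
      simp [PySem.Chars.splitOn, PySem.Chars.splitOn.go, mapHead]
    | c :: rest, fuel + 1 =>
      have hsl : 1 ≤ sep.length := by
        cases sep with
        | nil => exact absurd rfl hsep
        | cons a b => simp
      rw [PySem.Chars.splitOn.go.eq_def]
      by_cases hp : sep.isPrefixOf (c :: rest) = true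
      · simp only [hp, if_true]
        have hln : rest.length < n := by simp at hl; omega
        have hdlen : (List.drop sep.length (c :: rest)).length ≤ rest.length := by
          simp only [List.length_drop, List.length_cons]
          omega
        have hrec := ih rest.length hln (List.drop sep.length (c :: rest))
          hdlen fuel (by simp at hfuel; omega) [] (cur.reverse :: acc)
        rw [hrec]
        -- expand splitOn (c::rest) sep one step
        have hexp : PySem.Chars.splitOn (c :: rest) sep
            = [] :: PySem.Chars.splitOn (List.drop sep.length (c :: rest)) sep := by
          show PySem.Chars.splitOn.go sep ((c::rest).length + 1) (c :: rest) [] [] = _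
          rw [PySem.Chars.splitOn.go.eq_def]
          simp only [hp, if_true, List.length_cons]
          have := ih rest.length hln (List.drop sep.length (c :: rest))
            hdlen (rest.length + 1) (by omega) [] [[]]
          simp only [List.reverse_nil]
          rw [this]
          simp [mapHead]
          cases h : PySem.Chars.splitOn (List.drop sep.length (c :: rest)) sep with
          | nil => simp [mapHead]
          | cons x xs => simp [mapHead]
        rw [hexp]
        simp [mapHead]
        cases h : PySem.Chars.splitOn (List.drop sep.length (c :: rest)) sep with
        | nil => simp [mapHead]
        | cons x xs => simp [mapHead]
      · simp only [hp, if_false]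
        have hn : (c :: rest).length - 1 < n := by
          simp only [List.length_cons] at hl ⊢; omega
        have hrec := ih rest.length (by simp at hl; omega) rest (le_refl _) fuel
          (by simp at hfuel; omega) (c :: cur) acc
        rw [hrec]
        have hexp : PySem.Chars.splitOn (c :: rest) sep
            = mapHead (fun p => c :: p) (PySem.Chars.splitOn rest sep) := by
          show PySem.Chars.splitOn.go sep ((c::rest).length + 1) (c :: rest) [] [] = _
          rw [PySem.Chars.splitOn.go.eq_def]
          simp only [hp, if_false, List.length_cons]
          have := ih rest.length (by simp at hl; omega) rest (le_refl _) (rest.length + 1)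
            (by omega) [c] []
          rw [this]
          cases h : PySem.Chars.splitOn rest sep with
          | nil => simp [mapHead]
          | cons x xs => simp [mapHead]
        rw [hexp]
        cases h : PySem.Chars.splitOn rest sep with
        | nil => simp [mapHead]
        | cons x xs => simp [mapHead]

theorem splitOn_go_ne_nil (sep : List Char) :
    ∀ (fuel : Nat) (l cur : List Char) (acc : List (List Char)),
      PySem.Chars.splitOn.go sep fuel l cur acc ≠ [] := by
  intro fuel
  induction fuel with
  | zero => intro l cur acc; rw [PySem.Chars.splitOn.go.eq_def]; simp
  | succ fuel ih =>
    intro l cur acc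
    rw [PySem.Chars.splitOn.go.eq_def]
    cases l with
    | nil => simp
    | cons c rest =>
      by_cases hp : sep.isPrefixOf (c :: rest) = true
      · simp only [hp, if_true]; exact ih _ _ _
      · simp only [hp, if_false]; exact ih _ _ _

theorem splitOn_ne_nil (t sep : List Char) : PySem.Chars.splitOn t sep ≠ [] :=
  splitOn_go_ne_nil sep _ t [] []

theorem splitOn_pos (sep : List Char) (hsep : sep ≠ []) (c : Char) (rest : List Char)
    (hp : sep.isPrefixOf (c :: rest) = true) :
    PySem.Chars.splitOn (c :: rest) sep
      = [] :: PySem.Chars.splitOn (List.drop sep.length (c :: rest)) sep := by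
  have hsl : 1 ≤ sep.length := List.length_pos_iff.mpr hsep
  show PySem.Chars.splitOn.go sep ((c::rest).length + 1) (c :: rest) [] [] = _
  rw [PySem.Chars.splitOn.go.eq_def]
  simp only [hp, if_true, List.length_cons]
  rw [splitOn_go_spec sep hsep rest.length (List.drop sep.length (c :: rest))
    (by simp; omega) (rest.length + 1) (by simp; omega) [] [[].reverse]]
  cases h : PySem.Chars.splitOn (List.drop sep.length (c :: rest)) sep with
  | nil => exact absurd h (splitOn_ne_nil _ _)
  | cons x xs => simp [mapHead]

theorem splitOn_neg (sep : List Char) (hsep : sep ≠ []) (c : Char) (rest : List Char)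
    (hp : ¬ sep.isPrefixOf (c :: rest) = true) :
    PySem.Chars.splitOn (c :: rest) sep = mapHead (fun p => c :: p) (PySem.Chars.splitOn rest sep) := by
  show PySem.Chars.splitOn.go sep ((c::rest).length + 1) (c :: rest) [] [] = _
  rw [PySem.Chars.splitOn.go.eq_def]
  simp only [hp, if_false, List.length_cons]
  rw [splitOn_go_spec sep hsep rest.length rest (le_refl _) (rest.length + 1) (by omega) [c] []]
  cases h : PySem.Chars.splitOn rest sep with
  | nil => exact absurd h (splitOn_ne_nil _ _)
  | cons x xs => simp [mapHead]

theorem find_go_shift (sep : List Char) (hsep : sep ≠ []) :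
    ∀ (l : List Char) (k : Nat), PySem.Chars.find.go sep l k
      = if PySem.Chars.find l sep = -1 then -1 else k + PySem.Chars.find l sep := by
  intro l
  induction l with
  | nil =>
    intro k
    rw [PySem.Chars.find.go.eq_def]
    simp [PySem.Chars.find, PySem.Chars.find.go, List.isEmpty_iff, hsep]
  | cons c rest ih =>
    intro k
    rw [PySem.Chars.find.go.eq_def]
    by_cases hp : sep.isPrefixOf (c :: rest) = true
    · have h0 : PySem.Chars.find (c :: rest) sep = 0 := by
        show PySem.Chars.find.go sep (c :: rest) 0 = 0
        rw [PySem.Chars.find.go.eq_def]; simp [hp]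
      simp [hp, h0]
    · have hstep : PySem.Chars.find (c :: rest) sep
          = if PySem.Chars.find rest sep = -1 then -1 else 1 + PySem.Chars.find rest sep := by
        show PySem.Chars.find.go sep (c :: rest) 0 = _
        rw [PySem.Chars.find.go.eq_def]
        simp only [hp, if_false]
        exact ih 1
      simp only [hp, if_false]
      rw [ih (k+1), hstep]
      have := PySem.Chars.neg_one_le_find rest sep
      by_cases h : PySem.Chars.find rest sep = -1
      · simp [h]
      · have hne : ¬ ((1:Int) + PySem.Chars.find rest sep = -1) := by omega
        have hne2 : ¬ ((k:Int) + 1 + PySem.Chars.find rest sep = -1) := by omega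
        simp only [h, if_false, hne, if_false]
        push_cast
        ring

theorem splitOn_find (sep : List Char) (hsep : sep ≠ []) :
    ∀ (n : Nat) (t : List Char), t.length ≤ n →
      PySem.Chars.splitOn t sep
        = if PySem.Chars.find t sep = -1 then [t]
          else t.take (PySem.Chars.find t sep).toNat
              :: PySem.Chars.splitOn (t.drop ((PySem.Chars.find t sep).toNat + sep.length)) sep := by
  intro n
  induction n with
  | zero =>
    intro t ht
    have : t = [] := List.length_eq_zero_iff.mp (Nat.le_zero.mp ht)
    subst this
    have : PySem.Chars.find [] sep = -1 := by
      show PySem.Chars.find.go sep [] 0 = -1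
      rw [PySem.Chars.find.go.eq_def]; simp [List.isEmpty_iff, hsep]
    simp [this]
    rfl
  | succ n ih =>
    intro t ht
    cases t with
    | nil =>
      have : PySem.Chars.find [] sep = -1 := by
        show PySem.Chars.find.go sep [] 0 = -1
        rw [PySem.Chars.find.go.eq_def]; simp [List.isEmpty_iff, hsep]
      simp [this]
      rfl
    | cons c rest =>
      by_cases hp : sep.isPrefixOf (c :: rest) = true
      · have h0 : PySem.Chars.find (c :: rest) sep = 0 := by
          show PySem.Chars.find.go sep (c :: rest) 0 = 0
          rw [PySem.Chars.find.go.eq_def]; simp [hp]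
        rw [splitOn_pos sep hsep c rest hp]
        simp [h0]
      · have hstep : PySem.Chars.find (c :: rest) sep
            = if PySem.Chars.find rest sep = -1 then -1 else 1 + PySem.Chars.find rest sep := by
          show PySem.Chars.find.go sep (c :: rest) 0 = _
          rw [PySem.Chars.find.go.eq_def]
          simp only [hp, if_false]
          exact find_go_shift sep hsep rest 1
        rw [splitOn_neg sep hsep c rest hp, ih rest (by simp at ht; omega), hstep]
        by_cases h : PySem.Chars.find rest sep = -1
        · simp [h, mapHead]
        · have hge : 0 ≤ PySem.Chars.find rest sep := by
            have := PySem.Chars.neg_one_le_find rest sep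
            omega
          simp only [h, if_false]
          have htn : (1 + PySem.Chars.find rest sep).toNat = (PySem.Chars.find rest sep).toNat + 1 := by
            omega
          have hne : ¬ (1 + PySem.Chars.find rest sep = -1) := by omega
          simp only [hne, if_false, htn, mapHead, List.take_succ_cons]
          rw [show (PySem.Chars.find rest sep).toNat + 1 + sep.length
              = ((PySem.Chars.find rest sep).toNat + sep.length) + 1 by omega,
            List.drop_succ_cons]

theorem splitOn_nil (sep : List Char) : PySem.Chars.splitOn [] sep = [[]] := rfl

theorem passTok_filter (sep : List Char) (hsep : sep ≠ []) :
    ∀ (n : Nat) (t : List Char), t.length ≤ n → ∀ (fuel : Nat), t.length < fuel →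
      (passTok sep fuel t).filter (fun x => x ≠ [])
        = (PySem.Chars.splitOn t sep).filter (fun x => x ≠ []) := by
  intro n
  induction n using Nat.strong_induction_on with
  | _ n ih =>
    intro t ht fuel hfuel
    have hsl : 1 ≤ sep.length := List.length_pos_iff.mpr hsep
    match fuel with
    | fuel + 1 =>
      cases t with
      | nil => rw [splitOn_nil]; simp [passTok]
      | cons c rest =>
        rw [splitOn_find sep hsep (c :: rest).length (c :: rest) (le_refl _)]
        simp only [passTok, List.length_cons, Nat.succ_sub_one, if_pos (Nat.succ_pos _)]
        by_cases h : PySem.Chars.find (c :: rest) sep = -1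
        · -- not found: partition returns (t, [], []); loop emits t then stops on []
          simp only [pyPartition, h, if_true]
          match fuel with
          | fuel + 1 => simp [passTok]
        · -- found at i ≥ 0
          have hge : 0 ≤ PySem.Chars.find (c :: rest) sep := by
            have := PySem.Chars.neg_one_le_find (c :: rest) sep; omega
          simp only [pyPartition, h, if_false]
          set i := (PySem.Chars.find (c :: rest) sep).toNat with hi
          have hdlt : (List.drop (i + sep.length) (c :: rest)).length < (c :: rest).length := by
            simp only [List.length_drop, List.length_cons]; omega
          have hrec := ih (List.drop (i + sep.length) (c :: rest)).length
            (by simp at ht ⊢; omega)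
            (List.drop (i + sep.length) (c :: rest)) (le_refl _) fuel
            (by simp at hfuel ⊢; omega)
          simp only [List.filter_cons]
          rw [hrec]
    termination_by n

def clean (ts : List (List Char)) : List (List Char) :=
  (ts.map PySem.Chars.strip).filter (fun x => x ≠ [])

theorem clean_append (xs ys : List (List Char)) : clean (xs ++ ys) = clean xs ++ clean ys := by
  simp [clean]

theorem clean_flatMap (f : List Char → List (List Char)) (ts : List (List Char)) :
    clean (ts.flatMap f) = ts.flatMap (fun t => clean (f t)) := by
  induction ts with
  | nil => rfl
  | cons t ts ih => simp only [List.flatMap_cons, clean_append, ih]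

theorem clean_splitAll_nil (seps : List (List Char)) :
    clean (splitAll seps []) = [] := by
  induction seps with
  | nil => rfl
  | cons sep rest ih =>
    show clean ((PySem.Chars.splitOn [] sep).flatMap (fun part => splitAll rest part)) = []
    rw [splitOn_nil]
    simpa using ih

theorem flatMap_filter_vanish (h : List Char → List (List Char)) (h0 : h [] = [])
    (P Q : List (List Char)) (hf : P.filter (fun x => x ≠ []) = Q.filter (fun x => x ≠ [])) :
    P.flatMap h = Q.flatMap h := by
  have key : ∀ (L : List (List Char)), L.flatMap h = (L.filter (fun x => x ≠ [])).flatMap h := by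
    intro L
    induction L with
    | nil => rfl
    | cons x xs ih =>
      by_cases hx : x = []
      · subst hx; simp [h0, ih, List.filter_cons]
      · simp [List.filter_cons, hx, ih]
  rw [key P, key Q, hf]

theorem fold_clean (seps : List (List Char)) (hs : ∀ sep ∈ seps, sep ≠ []) :
    ∀ (ts : List (List Char)),
      clean (seps.foldl
        (fun tokens sep =>
          tokens.foldl (fun newtokens token => newtokens ++ passTok sep (token.length + 1) token) [])
        ts)
      = clean (ts.flatMap (fun t => splitAll seps t)) := by
  induction seps with
  | nil => intro ts; simp [splitAll]
  | cons sep rest ih =>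
    intro ts
    have hsep : sep ≠ [] := hs sep (by simp)
    have hrest : ∀ s ∈ rest, s ≠ [] := fun s hsm => hs s (by simp [hsm])
    rw [List.foldl_cons, ih hrest]
    have hpass : ts.foldl (fun newtokens token => newtokens ++ passTok sep (token.length + 1) token) []
        = ts.flatMap (fun t => passTok sep (t.length + 1) t) := by
      simpa using PySem.List.foldl_append_eq_flatMap (fun t => passTok sep (t.length + 1) t) ts []
    rw [hpass, List.flatMap_assoc]
    show clean (ts.flatMap fun t => (passTok sep (t.length + 1) t).flatMap (fun p => splitAll rest p))
        = clean (ts.flatMap fun t => (PySem.Chars.splitOn t sep).flatMap (fun p => splitAll rest p))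
    rw [clean_flatMap, clean_flatMap]
    apply List.flatMap_congr  -- pointwise over t
    intro t _
    rw [clean_flatMap, clean_flatMap]
    apply flatMap_filter_vanish
    · exact clean_splitAll_nil rest
    · exact passTok_filter sep hsep t.length t (le_refl _) (t.length + 1) (by omega)

theorem final_eq (seps : List (List Char)) (hs : ∀ sep ∈ seps, sep ≠ []) (cs : List Char) :
    (((seps.foldl
        (fun tokens sep =>
          tokens.foldl (fun newtokens token => newtokens ++ passTok sep (token.length + 1) token) [])
        [cs]).map PySem.Chars.strip).filter (fun x => decide (0 < x.length))).map String.ofList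
    = (((splitAll seps cs).map PySem.Chars.strip).filter (fun x => x ≠ [])).map String.ofList := by
  have hf : ∀ (L : List (List Char)),
      L.filter (fun x => decide (0 < x.length)) = L.filter (fun x => x ≠ []) := by
    intro L; apply List.filter_congr; intro x _; cases x <;> simp
  rw [hf]
  have h := fold_clean seps hs [cs]
  simp only [clean] at h
  rw [h]
  simp

-- ===== VERDICT (by name: the statement is the Claim_ definition above) =====
theorem natural_list_parse_spec : Claim_equal_natural_list_parse := by
  intro s symbol_only _
  unfold Spec_natural_list_parse natural_list_parse natural_list_parse_alt
  cases symbol_only with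
  | false =>
    simp only [Bool.not_false, if_true]
    exact final_eq _ (by decide) s.toList
  | true =>
    simp only [Bool.not_true, Bool.false_eq_true, if_false]
    exact final_eq _ (by decide) s.toList
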